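-- pv_equiv track=rewrite | github.com/pterw/ScrobbleScope | scripts/doc_state_sync.py | _find_marker_pair
-- ===== SOURCE A (Python) =====
-- class SyncError(RuntimeError):
--     """Raised when deterministic sync cannot proceed safely."""
--
-- def _find_marker_pair(
--     lines: list[str], start_marker: str, end_marker: str, label: str
-- ) -> tuple[int, int]:
--     starts = [i for i, line in enumerate(lines) if line.strip() == start_marker]
--     ends = [i for i, line in enumerate(lines) if line.strip() == end_marker]
--     if not starts or not ends:
--         raise SyncError(
--             f"{label} must contain start marker ({start_marker}) and end marker ({end_marker})."
--         )
--     start_idx = starts[0]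
--     end_idx = ends[-1]
--     if start_idx >= end_idx:
--         raise SyncError(
--             f"{label} marker order is invalid: start marker is after end marker."
--         )
--     return start_idx, end_idx
-- ===== SOURCE B (Python) =====
-- class SyncError(RuntimeError):
--     """Raised when deterministic sync cannot proceed safely."""
--
-- def _find_marker_pair(lines, start_marker, end_marker, label):
--     start_idx = None
--     end_idx = None
--     for i, line in enumerate(lines):
--         stripped = line.strip()
--         if start_idx is None and stripped == start_marker:
--             start_idx = i
--         if stripped == end_marker:
--             end_idx = i
--     if start_idx is None or end_idx is None:
--         raise SyncError(
--             f"{label} must contain start marker ({start_marker}) and end marker ({end_marker})."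
--         )
--     if start_idx >= end_idx:
--         raise SyncError(
--             f"{label} marker order is invalid: start marker is after end marker."
--         )
--     return start_idx, end_idx
-- ===== Notes on version B (the rewrite author's own statement) =====
-- stated objective: alternative
-- what changed: Replaces A's two full enumerate-filter comprehensions (plus indexing into the resulting lists) by one single-pass scan that maintains first-start and last-end indices in an accumulator.
import Mathlib
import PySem

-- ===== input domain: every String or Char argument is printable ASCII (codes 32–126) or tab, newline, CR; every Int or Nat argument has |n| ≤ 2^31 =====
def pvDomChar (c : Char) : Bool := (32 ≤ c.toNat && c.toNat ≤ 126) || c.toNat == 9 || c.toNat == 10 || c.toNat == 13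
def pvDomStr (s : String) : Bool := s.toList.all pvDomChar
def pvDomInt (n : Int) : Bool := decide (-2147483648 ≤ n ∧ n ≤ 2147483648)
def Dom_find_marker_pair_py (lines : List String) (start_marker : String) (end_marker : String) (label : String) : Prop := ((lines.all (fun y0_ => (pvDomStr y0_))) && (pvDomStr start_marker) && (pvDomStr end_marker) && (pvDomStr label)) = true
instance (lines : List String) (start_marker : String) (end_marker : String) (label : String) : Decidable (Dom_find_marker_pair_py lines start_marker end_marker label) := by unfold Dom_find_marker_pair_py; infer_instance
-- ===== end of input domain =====

-- B replaces A's two enumerate-filter comprehensions by one single-pass scan keeping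
-- first-start / last-end in an accumulator (alternative decomposition, same cost).

-- ===== PORT A =====
def find_marker_pair_py (lines : List String) (start_marker : String) (end_marker : String) (label : String) : Int × Int :=
  let starts := ((PySem.List.enumerate lines 0).filter
      (fun p => PySem.Str.strip p.2 = start_marker)).map (·.1)
  let ends := ((PySem.List.enumerate lines 0).filter
      (fun p => PySem.Str.strip p.2 = end_marker)).map (·.1)
  if starts = [] ∨ ends = [] then (0, 0)   -- Python raises SyncError here (outside Pre_)
  else
    match PySem.List.pyGet? starts 0, PySem.List.pyGet? ends (-1) with
    | some start_idx, some end_idx =>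
        if start_idx ≥ end_idx then (0, 0)  -- Python raises SyncError here (outside Pre_)
        else (start_idx, end_idx)
    | _, _ => (0, 0)                        -- unreachable: both lists are nonempty

-- ===== PORT B =====
def find_marker_pair_py_alt (lines : List String) (start_marker : String) (end_marker : String) (label : String) : Int × Int :=
  let st := (PySem.List.enumerate lines 0).foldl
    (fun (acc : Option Int × Option Int) p =>
      let stripped := PySem.Str.strip p.2
      ((if acc.1 = none ∧ stripped = start_marker then some p.1 else acc.1),
       (if stripped = end_marker then some p.1 else acc.2)))
    (none, none)
  match st.1 with
  | none => (0, 0)                          -- Python raises SyncError here (outside Pre_)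
  | some start_idx =>
    match st.2 with
    | none => (0, 0)                        -- Python raises SyncError here (outside Pre_)
    | some end_idx =>
      if start_idx ≥ end_idx then (0, 0)    -- Python raises SyncError here (outside Pre_)
      else (start_idx, end_idx)

-- ===== PRECONDITION & SPEC =====
-- Pre_ excludes exactly the inputs on which A raises SyncError: no line strips to the
-- start marker, no line strips to the end marker, or the first start is not strictly
-- before the last end (equivalently: no start index strictly precedes some end index).
def Pre_find_marker_pair_py (lines : List String) (start_marker : String) (end_marker : String) (label : String) : Prop :=
  ∃ p ∈ PySem.List.enumerate lines 0, ∃ q ∈ PySem.List.enumerate lines 0,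
    PySem.Str.strip p.2 = start_marker ∧ PySem.Str.strip q.2 = end_marker ∧ p.1 < q.1
instance (lines : List String) (start_marker : String) (end_marker : String) (label : String) : Decidable (Pre_find_marker_pair_py lines start_marker end_marker label) := by unfold Pre_find_marker_pair_py; infer_instance

def pvWitness_find_marker_pair_py : List String × String × String × String :=
  (["<!-- s -->", "body", "<!-- e -->"], "<!-- s -->", "<!-- e -->", "README")

def Spec_find_marker_pair_py (lines : List String) (start_marker : String) (end_marker : String) (label : String) (out : Int × Int) : Prop := out = find_marker_pair_py_alt lines start_marker end_marker label
instance (lines : List String) (start_marker : String) (end_marker : String) (label : String) (out : Int × Int) : Decidable (Spec_find_marker_pair_py lines start_marker end_marker label out) := by unfold Spec_find_marker_pair_py; infer_instance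

-- ===== CLAIM (what is proved, stated in full; the proofs are below) =====
def Claim_equal_find_marker_pair_py : Prop := ∀ (lines : List String) (start_marker : String) (end_marker : String) (label : String), Dom_find_marker_pair_py lines start_marker end_marker label → Pre_find_marker_pair_py lines start_marker end_marker label → Spec_find_marker_pair_py lines start_marker end_marker label (find_marker_pair_py lines start_marker end_marker label)

-- ===== LEMMAS AND PROOFS =====

-- B's fold: the first component is the first matching index (unless already set).
lemma fold_fst (s e : String) : ∀ (l : List (Int × String)) (a b : Option Int),
    (l.foldl
      (fun (acc : Option Int × Option Int) p =>
        ((if acc.1 = none ∧ PySem.Str.strip p.2 = s then some p.1 else acc.1),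
         (if PySem.Str.strip p.2 = e then some p.1 else acc.2))) (a, b)).1
    = a.or (((l.filter (fun p => PySem.Str.strip p.2 = s)).map (·.1)).head?) := by
  intro l
  induction l with
  | nil => intro a b; simp
  | cons x t ih =>
    intro a b
    simp only [List.foldl_cons, List.filter_cons]
    by_cases hx : PySem.Str.strip x.2 = s
    · cases a with
      | none => simp [hx, ih]
      | some v => simp [hx, ih]
    · cases a with
      | none => simp [hx, ih]
      | some v => simp [hx, ih]

-- B's fold: the second component is the last matching index (falling back to b).
lemma fold_snd (s e : String) : ∀ (l : List (Int × String)) (a b : Option Int),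
    (l.foldl
      (fun (acc : Option Int × Option Int) p =>
        ((if acc.1 = none ∧ PySem.Str.strip p.2 = s then some p.1 else acc.1),
         (if PySem.Str.strip p.2 = e then some p.1 else acc.2))) (a, b)).2
    = (((l.filter (fun p => PySem.Str.strip p.2 = e)).map (·.1)).getLast?).or b := by
  intro l
  induction l with
  | nil => intro a b; simp
  | cons x t ih =>
    intro a b
    simp only [List.foldl_cons, List.filter_cons]
    by_cases hx : PySem.Str.strip x.2 = e
    · simp only [hx, ite_true]
      rw [ih]
      cases h : ((t.filter (fun p => PySem.Str.strip p.2 = e)).map (·.1)).getLast? with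
      | none =>
        simp [List.getLast?_cons, h]
      | some v =>
        simp [List.getLast?_cons, h]
    · simp [hx, ih]

lemma head?_pyGet?_zero (l : List Int) (h : l ≠ []) :
    PySem.List.pyGet? l 0 = l.head? := by
  cases l with
  | nil => simp at h
  | cons x t => simp [List.head?]

-- ===== VERDICT (by name: the statement is the Claim_ definition above) =====
theorem find_marker_pair_py_spec : Claim_equal_find_marker_pair_py := by
  intro lines s e label _ _
  unfold Spec_find_marker_pair_py find_marker_pair_py find_marker_pair_py_alt
  simp only []
  rw [show (List.foldl
      (fun (acc : Option Int × Option Int) p =>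
        ((if acc.1 = none ∧ PySem.Str.strip p.2 = s then some p.1 else acc.1),
         (if PySem.Str.strip p.2 = e then some p.1 else acc.2)))
      (none, none) (PySem.List.enumerate lines 0))
    = ((((PySem.List.enumerate lines 0).filter (fun p => PySem.Str.strip p.2 = s)).map (·.1)).head?,
       (((PySem.List.enumerate lines 0).filter (fun p => PySem.Str.strip p.2 = e)).map (·.1)).getLast?) from
    Prod.ext (by rw [fold_fst s e]; simp) (by rw [fold_snd s e]; simp)]
  set starts := ((PySem.List.enumerate lines 0).filter
      (fun p => PySem.Str.strip p.2 = s)).map (·.1) with hs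
  set ends := ((PySem.List.enumerate lines 0).filter
      (fun p => PySem.Str.strip p.2 = e)).map (·.1) with he
  by_cases h1 : starts = []
  · simp [h1]
  · by_cases h2 : ends = []
    · simp [h1, h2]
      cases starts.head? <;> rfl
    · rw [if_neg (by simp [h1, h2])]
      rw [head?_pyGet?_zero starts h1, PySem.List.pyGet?_neg_one]
      cases hh : starts.head? with
      | none => exact absurd (List.head?_eq_none_iff.mp hh) h1
      | some a =>
        cases hg : ends.getLast? with
        | none => exact absurd (List.getLast?_eq_none_iff.mp hg) h2
        | some b => rfl
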